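-- pv_equiv track=rewrite | github.com/oliverjd/advent-of-code-2018 | solutions/day_22.py | get_el
-- ===== SOURCE A (Python) =====
-- def get_el(depth, target, limit):
--     el = [[0 for x in range(limit[0] + 1)] for y in range(limit[1] + 1)]
--     for y in range(limit[1] + 1):
--         for x in range(limit[0] + 1):
--             if y == 0 and x == 0:
--                el[y][x] = (0 + depth) % 20183
--             elif y == 0:
--                 el[y][x] = ((x * 16807) + depth) % 20183
--             elif x == 0:
--                 el[y][x] = ((y * 48271) + depth) % 20183
--             elif x == target[0] and y == target[1]:
--                 el[y][x] = (0 + depth) % 20183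
--             else:
--                 el[y][x] = (el[y][x-1] * el[y-1][x] + depth) % 20183
--     return el
-- ===== SOURCE B (Python) =====
-- def get_el(depth, target, limit):
--     """Demand-driven memoized recursion over the dependency structure:
--     erosion(x, y) computes one cell from its recursive dependencies and
--     caches it (None = not yet computed); the grid is that function
--     sampled at every cell."""
--     tx, ty = target
--     W = limit[0] + 1
--     cache = [[None] * W for _ in range(limit[1] + 1)]
--     def erosion(x, y):
--         row = cache[y]
--         v = row[x]
--         if v is not None:
--             return v
--         if y == 0 and x == 0:
--             v = depth % 20183
--         elif y == 0:
--             v = (x * 16807 + depth) % 20183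
--         elif x == 0:
--             v = (y * 48271 + depth) % 20183
--         elif x == tx and y == ty:
--             v = depth % 20183
--         else:
--             l = row[x - 1]
--             if l is None:
--                 l = erosion(x - 1, y)
--             u = cache[y - 1][x]
--             if u is None:
--                 u = erosion(x, y - 1)
--             v = (l * u + depth) % 20183
--         row[x] = v
--         return v
--     return [[erosion(x, y) for x in range(W)]
--             for y in range(limit[1] + 1)]
-- ===== Notes on version B (the rewrite author's own statement) =====
-- stated objective: alternative
-- what changed: Replaces A's row-major in-place fill of a preallocated grid with a demand-driven memoized recursive function erosion(x,y) that recurses on a cell's dependencies and caches results (None-sentinel cache), the grid being that function sampled at every cell.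
import Mathlib
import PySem

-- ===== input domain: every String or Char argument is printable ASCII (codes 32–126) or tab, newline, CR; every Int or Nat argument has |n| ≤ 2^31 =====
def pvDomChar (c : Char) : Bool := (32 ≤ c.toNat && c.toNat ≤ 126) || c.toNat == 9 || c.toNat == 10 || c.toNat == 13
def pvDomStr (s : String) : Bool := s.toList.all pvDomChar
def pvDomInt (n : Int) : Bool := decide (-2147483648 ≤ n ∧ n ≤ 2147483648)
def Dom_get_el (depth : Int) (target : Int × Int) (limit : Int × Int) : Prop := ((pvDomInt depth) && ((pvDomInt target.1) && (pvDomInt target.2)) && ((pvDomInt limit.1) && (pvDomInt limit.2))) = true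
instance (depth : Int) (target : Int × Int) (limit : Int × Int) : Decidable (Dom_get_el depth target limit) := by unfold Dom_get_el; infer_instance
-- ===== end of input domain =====

-- B replaces A's row-major in-place fill of a preallocated grid by a demand-driven
-- memoized recursive cell function cached in a dict (objective: alternative).

-- ===== PORT A =====
-- row-major fill of a preallocated zero matrix, el[y][x] assigned in place.
-- Indices into el are always 0 ≤ i < len here (loop variables from range), so
-- pyGetD/pySetD are exact at every access A performs.
def get_el (depth : Int) (target : Int × Int) (limit : Int × Int) : List (List Int) :=
  let el0 : List (List Int) :=
    (PySem.List.pyRange 0 (limit.2 + 1) 1).map (fun _ =>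
      (PySem.List.pyRange 0 (limit.1 + 1) 1).map (fun _ => (0 : Int)))
  (PySem.List.pyRange 0 (limit.2 + 1) 1).foldl (fun el y =>
    (PySem.List.pyRange 0 (limit.1 + 1) 1).foldl (fun el x =>
      let v : Int :=
        if y = 0 ∧ x = 0 then PySem.Int.mod (0 + depth) 20183
        else if y = 0 then PySem.Int.mod (x * 16807 + depth) 20183
        else if x = 0 then PySem.Int.mod (y * 48271 + depth) 20183
        else if x = target.1 ∧ y = target.2 then PySem.Int.mod (0 + depth) 20183
        else PySem.Int.mod (PySem.List.pyGetD (PySem.List.pyGetD el y []) (x - 1) 0 *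
                            PySem.List.pyGetD (PySem.List.pyGetD el (y - 1) []) x 0 + depth) 20183
      PySem.List.pySetD el y (PySem.List.pySetD (PySem.List.pyGetD el y []) x v)) el) el0

-- ===== PORT B =====
-- erosion(x, y) with its None-sentinel cache threaded through as explicit state.
-- The driver only calls it at range values and recursion only decreases in-range
-- coordinates, so x, y are natural numbers here; pyGetD/pySetD are exact at every
-- access B performs (all reached indices are in range), and [None] * W is
-- List.replicate W.toNat none (Python's list repetition clamps W <= 0 to empty).
def eroB (depth tx ty : Int) (x y : Nat) (cache : List (List (Option Int))) :
    Int × List (List (Option Int)) :=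
  match PySem.List.pyGetD (PySem.List.pyGetD cache (y : Int) []) (x : Int) none with
  | some v => (v, cache)
  | none =>
    let p : Int × List (List (Option Int)) :=
      if _ : y = 0 ∧ x = 0 then (PySem.Int.mod depth 20183, cache)
      else if _ : y = 0 then (PySem.Int.mod ((x : Int) * 16807 + depth) 20183, cache)
      else if _ : x = 0 then (PySem.Int.mod ((y : Int) * 48271 + depth) 20183, cache)
      else if _ : (x : Int) = tx ∧ (y : Int) = ty then (PySem.Int.mod depth 20183, cache)
      else
        -- l = row[x - 1]; if l is None: l = erosion(x - 1, y)
        let l0 := PySem.List.pyGetD (PySem.List.pyGetD cache (y : Int) []) ((x : Int) - 1) none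
        let l : Int × List (List (Option Int)) :=
          if l0 = none then eroB depth tx ty (x - 1) y cache else (l0.getD 0, cache)
        -- u = cache[y - 1][x]; if u is None: u = erosion(x, y - 1)
        let u0 := PySem.List.pyGetD (PySem.List.pyGetD l.2 ((y : Int) - 1) []) (x : Int) none
        let u : Int × List (List (Option Int)) :=
          if u0 = none then eroB depth tx ty x (y - 1) l.2 else (u0.getD 0, l.2)
        (PySem.Int.mod (l.1 * u.1 + depth) 20183, u.2)
    (p.1, PySem.List.pySetD p.2 (y : Int)
      (PySem.List.pySetD (PySem.List.pyGetD p.2 (y : Int) []) (x : Int) (some p.1)))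
termination_by x + y
decreasing_by
  · omega
  · omega

-- nested list comprehension over ranges, threading the shared cache.
def get_el_alt (depth : Int) (target : Int × Int) (limit : Int × Int) : List (List Int) :=
  let W := limit.1 + 1
  let cache0 : List (List (Option Int)) :=
    (PySem.List.pyRange 0 (limit.2 + 1) 1).map (fun _ =>
      List.replicate W.toNat (none : Option Int))
  let st :=
    (PySem.List.pyRange 0 (limit.2 + 1) 1).foldl
      (fun (st : List (List Int) × List (List (Option Int))) y =>
        let rt :=
          (PySem.List.pyRange 0 W 1).foldl
            (fun (rt : List Int × List (List (Option Int))) x =>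
              let p := eroB depth target.1 target.2 x.toNat y.toNat rt.2
              (rt.1 ++ [p.1], p.2))
            ([], st.2)
        (st.1 ++ [rt.1], rt.2))
      ([], cache0)
  st.1

-- ===== PRECONDITION & SPEC =====
def Spec_get_el (depth : Int) (target : Int × Int) (limit : Int × Int) (out : List (List Int)) : Prop := out = get_el_alt depth target limit
instance (depth : Int) (target : Int × Int) (limit : Int × Int) (out : List (List Int)) : Decidable (Spec_get_el depth target limit out) := by unfold Spec_get_el; infer_instance

-- ===== CLAIM (what is proved, stated in full; the proofs are below) =====
def Claim_equal_get_el : Prop := ∀ (depth : Int) (target : Int × Int) (limit : Int × Int), Dom_get_el depth target limit → Spec_get_el depth target limit (get_el depth target limit)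

-- ===== LEMMAS AND PROOFS =====

-- The erosion level of cell (x, y), by recursion on the dependency order.
def E (depth tx ty : Int) (x y : Nat) : Int :=
  if y = 0 ∧ x = 0 then PySem.Int.mod (0 + depth) 20183
  else if y = 0 then PySem.Int.mod ((x : Int) * 16807 + depth) 20183
  else if x = 0 then PySem.Int.mod ((y : Int) * 48271 + depth) 20183
  else if (x : Int) = tx ∧ (y : Int) = ty then PySem.Int.mod (0 + depth) 20183
  else PySem.Int.mod (E depth tx ty (x - 1) y * E depth tx ty x (y - 1) + depth) 20183
termination_by x + y
decreasing_by
  · omega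
  · omega

-- The finished matrix.
def M (depth tx ty : Int) (W H : Nat) : List (List Int) :=
  (List.range H).map (fun y => (List.range W).map (fun x => E depth tx ty x y))

theorem pyRange_toNat (n : Int) :
    PySem.List.pyRange 0 n 1 = PySem.List.pyRange 0 ((n.toNat : Nat) : Int) 1 := by
  rw [PySem.List.pyRange_one, PySem.List.pyRange_one]
  congr 2
  omega

-- ---------- A side ----------

-- partial fill: rows below y done, row y done up to column x, rest still 0
def P (depth tx ty : Int) (W H y x : Nat) : List (List Int) :=
  (List.range H).map (fun j => (List.range W).map (fun i =>
    if j < y ∨ (j = y ∧ i < x) then E depth tx ty i j else 0))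

theorem getP (depth tx ty : Int) (W H y x j : Nat) (hj : j < H) :
    PySem.List.pyGetD (P depth tx ty W H y x) (j : Int) [] =
      (List.range W).map (fun i => if j < y ∨ (j = y ∧ i < x) then E depth tx ty i j else 0) := by
  simp [P, List.getD_eq_getElem?_getD, hj]

theorem cellP (depth tx ty : Int) (W H y x i j : Nat) (hj : j < H) (hi : i < W)
    (hcond : j < y ∨ (j = y ∧ i < x)) :
    PySem.List.pyGetD (PySem.List.pyGetD (P depth tx ty W H y x) (j : Int) []) (i : Int) 0 =
      E depth tx ty i j := by
  rw [getP depth tx ty W H y x j hj]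
  simp [List.getD_eq_getElem?_getD, hi, hcond]

theorem setP (depth tx ty : Int) (W H y x : Nat) (hy : y < H) :
    PySem.List.pySetD (P depth tx ty W H y x) (y : Int)
      (PySem.List.pySetD (PySem.List.pyGetD (P depth tx ty W H y x) (y : Int) []) (x : Int)
        (E depth tx ty x y)) = P depth tx ty W H y (x + 1) := by
  rw [getP depth tx ty W H y x y hy]
  simp only [PySem.List.pySetD_natCast]
  apply List.ext_getElem
  · simp [P]
  intro j h1 h2
  simp only [P, List.length_map, List.length_range] at h2
  simp only [P, List.getElem_set, List.getElem_map, List.getElem_range]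
  by_cases hjy : y = j
  · rw [if_pos hjy]
    subst hjy
    apply List.ext_getElem
    · simp
    intro i g1 g2
    simp only [List.length_set, List.length_map, List.length_range] at g1 g2
    simp only [List.getElem_set, List.getElem_map, List.getElem_range]
    by_cases hix : x = i
    · rw [if_pos hix]
      subst hix
      split_ifs with c
      · rfl
      · exact absurd (Or.inr ⟨trivial, Nat.lt_succ_self x⟩) c
    · rw [if_neg hix]
      simp only [Nat.lt_irrefl, false_or, true_and]
      split_ifs with c1 c2 <;> first | rfl | omega
  · rw [if_neg hjy]
    apply List.map_congr_left
    intro i hi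
    split_ifs with c1 c2 <;> first | rfl | omega

theorem valA (depth tx ty : Int) (W H y x : Nat) (hy : y < H) (hx : x < W) :
    (if (y : Int) = 0 ∧ (x : Int) = 0 then PySem.Int.mod (0 + depth) 20183
     else if (y : Int) = 0 then PySem.Int.mod ((x : Int) * 16807 + depth) 20183
     else if (x : Int) = 0 then PySem.Int.mod ((y : Int) * 48271 + depth) 20183
     else if (x : Int) = tx ∧ (y : Int) = ty then PySem.Int.mod (0 + depth) 20183
     else PySem.Int.mod (PySem.List.pyGetD (PySem.List.pyGetD (P depth tx ty W H y x) ((y : Int)) []) ((x : Int) - 1) 0 *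
          PySem.List.pyGetD (PySem.List.pyGetD (P depth tx ty W H y x) ((y : Int) - 1) []) (x : Int) 0 + depth) 20183)
    = E depth tx ty x y := by
  rw [E]
  simp only [Nat.cast_eq_zero]
  by_cases h1 : y = 0 ∧ x = 0
  · simp [h1.1, h1.2]
  · rw [if_neg h1, if_neg h1]
    by_cases h2 : y = 0
    · simp [h2]
    · rw [if_neg h2, if_neg h2]
      by_cases h3 : x = 0
      · simp [h3]
      · rw [if_neg h3, if_neg h3]
        by_cases h4 : (x : Int) = tx ∧ (y : Int) = ty
        · rw [if_pos h4, if_pos h4]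
        · rw [if_neg h4, if_neg h4]
          rw [show ((x : Int) - 1) = (((x - 1 : Nat) : Nat) : Int) by omega,
              show ((y : Int) - 1) = (((y - 1 : Nat) : Nat) : Int) by omega]
          rw [cellP depth tx ty W H y x (x - 1) y hy (by omega) (by omega),
              cellP depth tx ty W H y x x (y - 1) (by omega) hx (by omega)]

theorem innerA (depth tx ty : Int) (W H y : Nat) (hy : y < H) :
    ∀ n, n ≤ W →
    (PySem.List.pyRange 0 (n : Int) 1).foldl (fun el x =>
      let v : Int :=
        if (y : Int) = 0 ∧ x = 0 then PySem.Int.mod (0 + depth) 20183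
        else if (y : Int) = 0 then PySem.Int.mod (x * 16807 + depth) 20183
        else if x = 0 then PySem.Int.mod ((y : Int) * 48271 + depth) 20183
        else if x = tx ∧ (y : Int) = ty then PySem.Int.mod (0 + depth) 20183
        else PySem.Int.mod (PySem.List.pyGetD (PySem.List.pyGetD el (y : Int) []) (x - 1) 0 *
                            PySem.List.pyGetD (PySem.List.pyGetD el ((y : Int) - 1) []) x 0 + depth) 20183
      PySem.List.pySetD el (y : Int) (PySem.List.pySetD (PySem.List.pyGetD el (y : Int) []) x v))
      (P depth tx ty W H y 0)
    = P depth tx ty W H y n := by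
  intro n
  induction n with
  | zero => intro _; rw [PySem.List.pyRange_one_eq_nil (a := 0) (b := ((0 : Nat) : Int)) (by norm_num)]; rfl
  | succ n ih =>
    intro hn
    rw [show ((n + 1 : Nat) : Int) = (n : Int) + 1 by push_cast; ring,
        PySem.List.pyRange_one_succ_right (by positivity), List.foldl_append, ih (by omega)]
    simp only [List.foldl_cons, List.foldl_nil]
    rw [valA depth tx ty W H y n hy (by omega)]
    exact setP depth tx ty W H y n hy

theorem rowdoneP (depth tx ty : Int) (W H y : Nat) :
    P depth tx ty W H y W = P depth tx ty W H (y + 1) 0 := by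
  unfold P
  apply List.map_congr_left
  intro j hj
  apply List.map_congr_left
  intro i hi
  simp only [List.mem_range] at hj hi
  split_ifs with c1 c2 <;> first | rfl | omega

theorem outerA (depth tx ty : Int) (W H : Nat) :
    ∀ n, n ≤ H →
    (PySem.List.pyRange 0 (n : Int) 1).foldl (fun el y =>
      (PySem.List.pyRange 0 (W : Int) 1).foldl (fun el x =>
        let v : Int :=
          if y = 0 ∧ x = 0 then PySem.Int.mod (0 + depth) 20183
          else if y = 0 then PySem.Int.mod (x * 16807 + depth) 20183
          else if x = 0 then PySem.Int.mod (y * 48271 + depth) 20183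
          else if x = tx ∧ y = ty then PySem.Int.mod (0 + depth) 20183
          else PySem.Int.mod (PySem.List.pyGetD (PySem.List.pyGetD el y []) (x - 1) 0 *
                              PySem.List.pyGetD (PySem.List.pyGetD el (y - 1) []) x 0 + depth) 20183
        PySem.List.pySetD el y (PySem.List.pySetD (PySem.List.pyGetD el y []) x v)) el)
      (P depth tx ty W H 0 0)
    = P depth tx ty W H n 0 := by
  intro n
  induction n with
  | zero => intro _; rw [PySem.List.pyRange_one_eq_nil (a := 0) (b := ((0 : Nat) : Int)) (by norm_num)]; rfl
  | succ n ih =>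
    intro hn
    rw [show ((n + 1 : Nat) : Int) = (n : Int) + 1 by push_cast; ring,
        PySem.List.pyRange_one_succ_right (by positivity), List.foldl_append, ih (by omega)]
    simp only [List.foldl_cons, List.foldl_nil]
    rw [innerA depth tx ty W H n (by omega) W le_rfl]
    exact rowdoneP depth tx ty W H n

theorem el0_eq_P (depth tx ty : Int) (W H : Nat) :
    (PySem.List.pyRange 0 (H : Int) 1).map (fun _ =>
      (PySem.List.pyRange 0 (W : Int) 1).map (fun _ => (0 : Int)))
    = P depth tx ty W H 0 0 := by
  unfold P
  rw [PySem.List.pyRange_one, PySem.List.pyRange_one]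
  simp [Function.comp_def, List.map_const']

theorem P_H_eq_M (depth tx ty : Int) (W H : Nat) :
    P depth tx ty W H H 0 = M depth tx ty W H := by
  unfold P M
  apply List.map_congr_left
  intro j hj
  apply List.map_congr_left
  intro i hi
  simp only [List.mem_range] at hj hi
  rw [if_pos (by omega)]

theorem get_el_eq_M (depth : Int) (target : Int × Int) (limit : Int × Int) :
    get_el depth target limit =
      M depth target.1 target.2 (limit.1 + 1).toNat (limit.2 + 1).toNat := by
  obtain ⟨tx, ty⟩ := target
  obtain ⟨lx, ly⟩ := limit
  unfold get_el
  simp only []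
  rw [pyRange_toNat (ly + 1), pyRange_toNat (lx + 1)]
  rw [el0_eq_P depth tx ty (lx + 1).toNat (ly + 1).toNat,
      ← P_H_eq_M depth tx ty (lx + 1).toNat (ly + 1).toNat]
  exact outerA depth tx ty (lx + 1).toNat (ly + 1).toNat (ly + 1).toNat le_rfl

-- ---------- B side ----------

-- a cache is Good if every filled entry is the true erosion level of its cell
def Good (depth tx ty : Int) (c : List (List (Option Int))) : Prop :=
  ∀ (x y : Nat) (v : Int), (c.getD y []).getD x none = some v → v = E depth tx ty x y

theorem good_init (depth tx ty : Int) (h : Int) (k : Nat) :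
    Good depth tx ty ((PySem.List.pyRange 0 h 1).map (fun _ =>
      List.replicate k (none : Option Int))) := by
  intro x y v hv
  simp only [List.getD_eq_getElem?_getD, List.getElem?_map] at hv
  cases hrow : (PySem.List.pyRange 0 h 1)[y]? with
  | none => simp [hrow] at hv
  | some _ =>
    rw [hrow] at hv
    simp only [Option.map_some, Option.getD_some, List.getElem?_replicate] at hv
    split_ifs at hv <;> simp at hv

theorem getD_set {α : Type} (l : List α) (i j : Nat) (v d : α) :
    (l.set i v).getD j d = if i = j ∧ i < l.length then v else l.getD j d := by
  by_cases hij : i = j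
  · subst hij
    by_cases hl : i < l.length
    · simp [List.getD_eq_getElem?_getD, hl]
    · simp [List.set_eq_of_length_le (Nat.le_of_not_lt hl), hl]
  · simp [List.getD_eq_getElem?_getD, List.getElem?_set_ne hij, hij]

theorem good_set (depth tx ty : Int) (c : List (List (Option Int)))
    (hm : Good depth tx ty c) (x y : Nat) :
    Good depth tx ty (PySem.List.pySetD c ((y : Nat) : Int)
      (PySem.List.pySetD (PySem.List.pyGetD c ((y : Nat) : Int) []) ((x : Nat) : Int)
        (some (E depth tx ty x y)))) := by
  intro a b v h
  simp only [PySem.List.pySetD_natCast, PySem.List.pyGetD_natCast] at h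
  rw [getD_set] at h
  split_ifs at h with hc
  · rw [getD_set] at h
    obtain ⟨hyb, _⟩ := hc
    subst hyb
    split_ifs at h with hc2
    · obtain ⟨hxa, _⟩ := hc2
      subst hxa
      exact (Option.some.inj h).symm
    · exact hm a y v h
  · exact hm a b v h

theorem eroB_tail (depth tx ty : Int) (x y : Nat) (lv uv : Int)
    (C : List (List (Option Int))) (hC : Good depth tx ty C)
    (hl : lv = E depth tx ty (x - 1) y) (hu : uv = E depth tx ty x (y - 1))
    (h1 : ¬(y = 0 ∧ x = 0)) (h2 : ¬ y = 0) (h3 : ¬ x = 0)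
    (h4 : ¬((x : Int) = tx ∧ (y : Int) = ty)) :
    PySem.Int.mod (lv * uv + depth) 20183 = E depth tx ty x y ∧
      Good depth tx ty (PySem.List.pySetD C ((y : Nat) : Int)
        (PySem.List.pySetD (PySem.List.pyGetD C ((y : Nat) : Int) []) ((x : Nat) : Int)
          (some (PySem.Int.mod (lv * uv + depth) 20183)))) := by
  have hE : PySem.Int.mod (lv * uv + depth) 20183 = E depth tx ty x y := by
    rw [hl, hu]
    conv_rhs => rw [E]
    rw [if_neg h1, if_neg h2, if_neg h3, if_neg h4]
  exact ⟨hE, hE ▸ good_set depth tx ty C hC x y⟩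

theorem eroB_spec (depth tx ty : Int) :
    ∀ (k x y : Nat), x + y ≤ k → ∀ (c : List (List (Option Int))), Good depth tx ty c →
    (eroB depth tx ty x y c).1 = E depth tx ty x y ∧
      Good depth tx ty (eroB depth tx ty x y c).2 := by
  intro k
  induction k with
  | zero =>
    intro x y hxy c hm
    have hx0 : x = 0 := by omega
    have hy0 : y = 0 := by omega
    subst hx0; subst hy0
    rw [eroB]
    cases h : PySem.List.pyGetD (PySem.List.pyGetD c ((0 : Nat) : Int) []) ((0 : Nat) : Int) none with
    | some v =>
      simp only []
      rw [PySem.List.pyGetD_natCast, PySem.List.pyGetD_natCast] at h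
      exact ⟨hm 0 0 v h, hm⟩
    | none =>
      simp only []
      have hE : PySem.Int.mod depth 20183 = E depth tx ty 0 0 := by
        rw [E]; simp
      exact ⟨hE, hE ▸ good_set depth tx ty c hm 0 0⟩
  | succ k ih =>
    intro x y hxy c hm
    rw [eroB]
    cases h : PySem.List.pyGetD (PySem.List.pyGetD c ((y : Nat) : Int) []) ((x : Nat) : Int) none with
    | some v =>
      simp only []
      rw [PySem.List.pyGetD_natCast, PySem.List.pyGetD_natCast] at h
      exact ⟨hm x y v h, hm⟩
    | none =>
      simp only []
      by_cases h1 : y = 0 ∧ x = 0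
      · rw [dif_pos h1]
        have hE : PySem.Int.mod depth 20183 = E depth tx ty x y := by
          rw [E, if_pos h1]; simp
        exact ⟨hE, hE ▸ good_set depth tx ty c hm x y⟩
      · rw [dif_neg h1]
        by_cases h2 : y = 0
        · rw [dif_pos h2]
          have hE : PySem.Int.mod ((x : Int) * 16807 + depth) 20183 = E depth tx ty x y := by
            rw [E, if_neg h1, if_pos h2]
          exact ⟨hE, hE ▸ good_set depth tx ty c hm x y⟩
        · rw [dif_neg h2]
          by_cases h3 : x = 0
          · rw [dif_pos h3]
            have hE : PySem.Int.mod ((y : Int) * 48271 + depth) 20183 = E depth tx ty x y := by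
              rw [E, if_neg h1, if_neg h2, if_pos h3]
            exact ⟨hE, hE ▸ good_set depth tx ty c hm x y⟩
          · rw [dif_neg h3]
            by_cases h4 : (x : Int) = tx ∧ (y : Int) = ty
            · rw [dif_pos h4]
              have hE : PySem.Int.mod depth 20183 = E depth tx ty x y := by
                rw [E, if_neg h1, if_neg h2, if_neg h3, if_pos h4]; simp
              exact ⟨hE, hE ▸ good_set depth tx ty c hm x y⟩
            · rw [dif_neg h4]
              rw [show (((x : Nat) : Int) - 1) = (((x - 1 : Nat) : Nat) : Int) by omega,
                  show (((y : Nat) : Int) - 1) = (((y - 1 : Nat) : Nat) : Int) by omega]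
              cases hlk : PySem.List.pyGetD (PySem.List.pyGetD c ((y : Nat) : Int) [])
                  (((x - 1 : Nat) : Nat) : Int) none with
              | some l0 =>
                rw [if_neg (by simp)]
                simp only [Option.getD_some]
                rw [PySem.List.pyGetD_natCast, PySem.List.pyGetD_natCast] at hlk
                have hl0 : l0 = E depth tx ty (x - 1) y := hm (x - 1) y l0 hlk
                cases huk : PySem.List.pyGetD (PySem.List.pyGetD c (((y - 1 : Nat) : Nat) : Int) [])
                    ((x : Nat) : Int) none with
                | some u0 =>
                  rw [if_neg (by simp)]
                  simp only [Option.getD_some]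
                  rw [PySem.List.pyGetD_natCast, PySem.List.pyGetD_natCast] at huk
                  exact eroB_tail depth tx ty x y l0 u0 c hm hl0
                    (hm x (y - 1) u0 huk) h1 h2 h3 h4
                | none =>
                  rw [if_pos rfl]
                  obtain ⟨hu, hmu⟩ := ih x (y - 1) (by omega) c hm
                  exact eroB_tail depth tx ty x y l0 _ _ hmu hl0 hu h1 h2 h3 h4
              | none =>
                rw [if_pos rfl]
                obtain ⟨hl, hml⟩ := ih (x - 1) y (by omega) c hm
                cases huk : PySem.List.pyGetD
                    (PySem.List.pyGetD (eroB depth tx ty (x - 1) y c).2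
                      (((y - 1 : Nat) : Nat) : Int) []) ((x : Nat) : Int) none with
                | some u0 =>
                  rw [if_neg (by simp)]
                  simp only [Option.getD_some]
                  rw [PySem.List.pyGetD_natCast, PySem.List.pyGetD_natCast] at huk
                  exact eroB_tail depth tx ty x y _ u0 _ hml hl
                    (hml x (y - 1) u0 huk) h1 h2 h3 h4
                | none =>
                  rw [if_pos rfl]
                  obtain ⟨hu, hmu⟩ := ih x (y - 1) (by omega) _ hml
                  exact eroB_tail depth tx ty x y _ _ _ hmu hl hu h1 h2 h3 h4

theorem rowB (depth tx ty : Int) (y : Nat) :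
    ∀ (n : Nat) (acc : List Int) (c : List (List (Option Int))), Good depth tx ty c →
    ∃ c', ((PySem.List.pyRange 0 (n : Int) 1).foldl
      (fun (rt : List Int × List (List (Option Int))) x =>
        let p := eroB depth tx ty x.toNat ((y : Int)).toNat rt.2
        (rt.1 ++ [p.1], p.2)) (acc, c))
      = (acc ++ (List.range n).map (fun x => E depth tx ty x y), c') ∧ Good depth tx ty c' := by
  intro n
  induction n with
  | zero =>
    intro acc c hm
    rw [PySem.List.pyRange_one_eq_nil (a := 0) (b := ((0 : Nat) : Int)) (by norm_num)]
    exact ⟨c, by simp, hm⟩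
  | succ n ih =>
    intro acc c hm
    rw [show ((n + 1 : Nat) : Int) = (n : Int) + 1 by push_cast; ring,
        PySem.List.pyRange_one_succ_right (by positivity), List.foldl_append]
    obtain ⟨c', heq, hm'⟩ := ih acc c hm
    rw [heq]
    simp only [List.foldl_cons, List.foldl_nil, Int.toNat_natCast]
    obtain ⟨hv, hg⟩ := eroB_spec depth tx ty (n + y) n y le_rfl c' hm'
    refine ⟨_, ?_, hg⟩
    rw [hv, List.range_succ, List.map_append]
    simp

theorem colB (depth tx ty : Int) (W : Nat) :
    ∀ (n : Nat) (acc : List (List Int)) (c : List (List (Option Int))), Good depth tx ty c →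
    ∃ c', ((PySem.List.pyRange 0 (n : Int) 1).foldl
      (fun (st : List (List Int) × List (List (Option Int))) y =>
        let rt := (PySem.List.pyRange 0 (W : Int) 1).foldl
          (fun (rt : List Int × List (List (Option Int))) x =>
            let p := eroB depth tx ty x.toNat y.toNat rt.2
            (rt.1 ++ [p.1], p.2)) ([], st.2)
        (st.1 ++ [rt.1], rt.2)) (acc, c))
      = (acc ++ (List.range n).map (fun y => (List.range W).map (fun x => E depth tx ty x y)), c')
      ∧ Good depth tx ty c' := by
  intro n
  induction n with
  | zero =>
    intro acc c hm
    rw [PySem.List.pyRange_one_eq_nil (a := 0) (b := ((0 : Nat) : Int)) (by norm_num)]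
    exact ⟨c, by simp, hm⟩
  | succ n ih =>
    intro acc c hm
    rw [show ((n + 1 : Nat) : Int) = (n : Int) + 1 by push_cast; ring,
        PySem.List.pyRange_one_succ_right (by positivity), List.foldl_append]
    obtain ⟨c', heq, hm'⟩ := ih acc c hm
    rw [heq]
    simp only [List.foldl_cons, List.foldl_nil]
    obtain ⟨c'', hrow, hg⟩ := rowB depth tx ty n W [] c' hm'
    rw [hrow]
    refine ⟨c'', ?_, hg⟩
    rw [List.range_succ, List.map_append]
    simp

theorem get_el_alt_eq_M (depth : Int) (target : Int × Int) (limit : Int × Int) :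
    get_el_alt depth target limit =
      M depth target.1 target.2 (limit.1 + 1).toNat (limit.2 + 1).toNat := by
  obtain ⟨tx, ty⟩ := target
  obtain ⟨lx, ly⟩ := limit
  unfold get_el_alt
  simp only []
  rw [pyRange_toNat (ly + 1), pyRange_toNat (lx + 1)]
  obtain ⟨c', heq, _⟩ := colB depth tx ty (lx + 1).toNat (ly + 1).toNat []
    ((PySem.List.pyRange 0 (((ly + 1).toNat : Nat) : Int) 1).map (fun _ =>
      List.replicate (lx + 1).toNat (none : Option Int)))
    (good_init depth tx ty (((ly + 1).toNat : Nat) : Int) (lx + 1).toNat)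
  rw [heq]
  simp [M]

-- ===== VERDICT (by name: the statement is the Claim_ definition above) =====
theorem get_el_spec : Claim_equal_get_el := by
  intro depth target limit _
  unfold Spec_get_el
  rw [get_el_eq_M, get_el_alt_eq_M]
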